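-- pv_equiv track=rewrite | github.com/VAndrejeus/sage-ch | agents/linux/platform_detect.py | _infer_family
-- ===== SOURCE A (Python) =====
-- from typing import List, Optional
--
-- def _infer_family(distro_id: str, distro_like: List[str]) -> str:
--     """
--     Infer a coarse Linux 'family' to choose commands later.
--     """
--     candidates = [distro_id.lower()] + distro_like
--
--     if any(x in candidates for x in ["rhel", "fedora", "centos", "rocky", "almalinux", "suse", "opensuse"]):
--         # Note: SUSE is different, but we can treat it as non-debian for now.
--         # We'll keep it under rhel-ish bucket for future extension or set to "unknown" if you prefer.
--         if any(x in candidates for x in ["suse", "opensuse"]):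
--             return "unknown"
--         return "rhel"
--
--     if any(x in candidates for x in ["debian", "ubuntu", "linuxmint"]):
--         return "debian"
--
--     return "unknown"
-- ===== SOURCE B (Python) =====
-- from typing import List
--
-- # Keyword -> family index: single pass over the candidates with a hash lookup,
-- # collecting which families were seen, then one priority decision at the end.
-- _KEYWORD_FAMILY = {
--     "suse": "suse", "opensuse": "suse",
--     "rhel": "rhel", "fedora": "rhel", "centos": "rhel",
--     "rocky": "rhel", "almalinux": "rhel",
--     "debian": "debian", "ubuntu": "debian", "linuxmint": "debian",
-- }
--
-- def _infer_family(distro_id: str, distro_like: List[str]) -> str: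
--     matched = {_KEYWORD_FAMILY[c]
--                for c in [distro_id.lower()] + distro_like
--                if c in _KEYWORD_FAMILY}
--     if "suse" in matched:
--         return "unknown"
--     if "rhel" in matched:
--         return "rhel"
--     if "debian" in matched:
--         return "debian"
--     return "unknown"
-- ===== Notes on version B (the rewrite author's own statement) =====
-- stated objective: idiomatic
-- what changed: Inverts the traversal: instead of scanning the candidate list once per keyword (10 membership scans), B makes a single pass over the candidates with a keyword->family dict, collects the set of matched families, and decides once by priority (suse overrides to unknown, then rhel, then debian).
import Mathlib
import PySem

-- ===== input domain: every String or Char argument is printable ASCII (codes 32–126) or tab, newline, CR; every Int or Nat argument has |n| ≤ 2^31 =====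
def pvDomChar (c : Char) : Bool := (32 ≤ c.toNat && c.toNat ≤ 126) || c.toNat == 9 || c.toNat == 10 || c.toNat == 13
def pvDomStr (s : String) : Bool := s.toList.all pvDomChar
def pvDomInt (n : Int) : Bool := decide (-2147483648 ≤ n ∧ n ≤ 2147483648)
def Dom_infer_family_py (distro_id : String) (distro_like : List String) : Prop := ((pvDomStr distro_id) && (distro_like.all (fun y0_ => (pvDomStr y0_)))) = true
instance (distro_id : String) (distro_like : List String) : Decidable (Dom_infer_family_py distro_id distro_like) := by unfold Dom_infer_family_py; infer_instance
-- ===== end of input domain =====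

-- B inverts the traversal: a single pass over the candidates through a keyword->family dict collecting the set of matched families, then one priority decision, replacing A's per-keyword membership scans (idiomatic restructuring).


-- ===== PORT A =====
def infer_family_py (distro_id : String) (distro_like : List String) : String :=
  let candidates : List String := PySem.Str.lower distro_id :: distro_like
  if (["rhel", "fedora", "centos", "rocky", "almalinux", "suse", "opensuse"].any
      (fun x => candidates.contains x)) then
    if (["suse", "opensuse"].any (fun x => candidates.contains x)) then "unknown"
    else "rhel"
  else if (["debian", "ubuntu", "linuxmint"].any (fun x => candidates.contains x)) then "debian"
  else "unknown"

-- ===== PORT B =====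
def keywordFamily : PySem.Dict String String :=
  PySem.Dict.ofList
    [("suse", "suse"), ("opensuse", "suse"),
     ("rhel", "rhel"), ("fedora", "rhel"), ("centos", "rhel"),
     ("rocky", "rhel"), ("almalinux", "rhel"),
     ("debian", "debian"), ("ubuntu", "debian"), ("linuxmint", "debian")]

-- the set comprehension: fold over the candidates, adding the family of each candidate found in the dict
def matchedFamilies (candidates : List String) : PySem.Set String :=
  candidates.foldl
    (fun s c => match keywordFamily.get? c with
      | some f => PySem.Set.add s f
      | none => s)
    PySem.Set.empty

def infer_family_py_alt (distro_id : String) (distro_like : List String) : String :=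
  let matched := matchedFamilies (PySem.Str.lower distro_id :: distro_like)
  if PySem.Set.contains matched "suse" then "unknown"
  else if PySem.Set.contains matched "rhel" then "rhel"
  else if PySem.Set.contains matched "debian" then "debian"
  else "unknown"

-- ===== PRECONDITION & SPEC =====
def Spec_infer_family_py (distro_id : String) (distro_like : List String) (out : String) : Prop := out = infer_family_py_alt distro_id distro_like
instance (distro_id : String) (distro_like : List String) (out : String) : Decidable (Spec_infer_family_py distro_id distro_like out) := by unfold Spec_infer_family_py; infer_instance

-- ===== CLAIM =====
def Claim_equal_infer_family_py : Prop := ∀ (distro_id : String) (distro_like : List String), Dom_infer_family_py distro_id distro_like → Spec_infer_family_py distro_id distro_like (infer_family_py distro_id distro_like)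

-- ===== LEMMAS AND PROOFS =====
theorem set_contains_add (s : PySem.Set String) (x f : String) :
    PySem.Set.contains (PySem.Set.add s x) f = (PySem.Set.contains s f || f == x) := by
  simp [PySem.Set.add, PySem.Set.contains]
  by_cases h : x ∈ s <;> by_cases h2 : f = x <;> simp_all

-- membership in the folded set = some candidate maps to that family
theorem contains_matched (cs : List String) (s : PySem.Set String) (f : String) :
    PySem.Set.contains
      (cs.foldl (fun s c => match keywordFamily.get? c with
        | some g => PySem.Set.add s g
        | none => s) s) f
    = (PySem.Set.contains s f || cs.any (fun c => keywordFamily.get? c == some f)) := by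
  induction cs generalizing s with
  | nil => simp
  | cons c cs ih =>
    simp only [List.foldl_cons, List.any_cons, ih]
    cases hg : keywordFamily.get? c with
    | none => simp
    | some g =>
      simp only [set_contains_add, Bool.or_assoc, hg]
      by_cases h : f = g
      · simp [h]
      · have h2 : ((some g == some f) : Bool) = false := by
          simp [Ne.symm h]
        have h3 : ((f == g) : Bool) = false := beq_eq_false_iff_ne.mpr h
        rw [h2, h3]

theorem keywordFamily_mk : keywordFamily = PySem.Dict.mk
    [("suse", "suse"), ("opensuse", "suse"),
     ("rhel", "rhel"), ("fedora", "rhel"), ("centos", "rhel"),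
     ("rocky", "rhel"), ("almalinux", "rhel"),
     ("debian", "debian"), ("ubuntu", "debian"), ("linuxmint", "debian")] := by decide

theorem lookup_suse (c : String) :
    (keywordFamily.get? c == some "suse") = (c == "suse" || c == "opensuse") := by
  by_cases h : c ∈ ["suse", "opensuse", "rhel", "fedora", "centos", "rocky", "almalinux",
      "debian", "ubuntu", "linuxmint"]
  · fin_cases h <;> decide
  · simp only [List.mem_cons, List.not_mem_nil, or_false, not_or] at h
    obtain ⟨h1, h2, h3, h4, h5, h6, h7, h8, h9, h10⟩ := h
    simp [keywordFamily_mk, PySem.Dict.get?_mk_cons, PySem.Dict.get?,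
      Ne.symm h1, Ne.symm h2, Ne.symm h3, Ne.symm h4, Ne.symm h5,
      Ne.symm h6, Ne.symm h7, Ne.symm h8, Ne.symm h9, Ne.symm h10,
      h1, h2, h3, h4, h5, h6, h7, h8, h9, h10]

theorem lookup_rhel (c : String) :
    (keywordFamily.get? c == some "rhel")
    = (c == "rhel" || (c == "fedora" || (c == "centos" || (c == "rocky" || c == "almalinux")))) := by
  by_cases h : c ∈ ["suse", "opensuse", "rhel", "fedora", "centos", "rocky", "almalinux",
      "debian", "ubuntu", "linuxmint"]
  · fin_cases h <;> decide
  · simp only [List.mem_cons, List.not_mem_nil, or_false, not_or] at h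
    obtain ⟨h1, h2, h3, h4, h5, h6, h7, h8, h9, h10⟩ := h
    simp [keywordFamily_mk, PySem.Dict.get?_mk_cons, PySem.Dict.get?,
      Ne.symm h1, Ne.symm h2, Ne.symm h3, Ne.symm h4, Ne.symm h5,
      Ne.symm h6, Ne.symm h7, Ne.symm h8, Ne.symm h9, Ne.symm h10,
      h1, h2, h3, h4, h5, h6, h7, h8, h9, h10]

theorem lookup_debian (c : String) :
    (keywordFamily.get? c == some "debian")
    = (c == "debian" || (c == "ubuntu" || c == "linuxmint")) := by
  by_cases h : c ∈ ["suse", "opensuse", "rhel", "fedora", "centos", "rocky", "almalinux",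
      "debian", "ubuntu", "linuxmint"]
  · fin_cases h <;> decide
  · simp only [List.mem_cons, List.not_mem_nil, or_false, not_or] at h
    obtain ⟨h1, h2, h3, h4, h5, h6, h7, h8, h9, h10⟩ := h
    simp [keywordFamily_mk, PySem.Dict.get?_mk_cons, PySem.Dict.get?,
      Ne.symm h1, Ne.symm h2, Ne.symm h3, Ne.symm h4, Ne.symm h5,
      Ne.symm h6, Ne.symm h7, Ne.symm h8, Ne.symm h9, Ne.symm h10,
      h1, h2, h3, h4, h5, h6, h7, h8, h9, h10]

theorem any_beq_or (cs : List String) (p q : String → Bool) :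
    cs.any (fun c => p c || q c) = (cs.any p || cs.any q) := by
  induction cs with
  | nil => rfl
  | cons c cs ih => cases hp : p c <;> cases hq : q c <;> simp [hp, hq, ih]

-- ===== VERDICT =====
theorem any_eq_mem (l : List String) (k : String) :
    (l.any fun c => c == k) = decide (k ∈ l) := by
  induction l with
  | nil => simp
  | cons a l ih =>
    by_cases h : a = k
    · simp [List.any_cons, ih, h]
    · simp [List.any_cons, ih, h, Ne.symm h]

theorem contains_cons_eq (a k : String) (l : List String) :
    (a :: l).contains k = (a == k || l.any fun c => c == k) := by
  simp only [List.contains_cons, any_eq_mem]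
  by_cases h : k = a
  · simp [h]
  · rw [beq_eq_false_iff_ne.mpr h, beq_eq_false_iff_ne.mpr (Ne.symm h)]; simp

theorem bool_decision (r f c ro a s o d u m : Bool) :
    (if (r || (f || (c || (ro || (a || (s || o)))))) = true then
       (if (s || o) = true then "unknown" else "rhel")
     else if (d || (u || m)) = true then "debian" else "unknown")
    = (if (s || o) = true then "unknown"
       else if (r || (f || (c || (ro || a)))) = true then "rhel"
       else if (d || (u || m)) = true then "debian" else "unknown") := by
  cases s <;> cases o <;> cases r <;> cases f <;> cases c <;> cases ro <;> cases a <;> simp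

theorem infer_family_py_spec : Claim_equal_infer_family_py := by
  intro distro_id distro_like _
  unfold Spec_infer_family_py
  simp only [infer_family_py, infer_family_py_alt, matchedFamilies]
  simp only [contains_matched]
  simp only [PySem.Set.contains, PySem.Set.empty, List.contains_nil, Bool.false_or,
    funext lookup_suse, funext lookup_rhel, funext lookup_debian, any_beq_or]
  simp only [List.any_cons, List.any_nil, Bool.or_false, contains_cons_eq]
  exact bool_decision _ _ _ _ _ _ _ _ _ _
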